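-- pv_equiv track=rewrite | github.com/MTES-MCT/asgard-manager | bibli_asgard.py | returnDicBlocUniquementNonReference
-- ===== SOURCE A (Python) =====
-- def returnDicBlocUniquementNonReference(mParamListBlocs, mParamSchemasBlocs) :
--     mListCodeBloc = []
--     for mListCode in mParamListBlocs :
--         mListCodeBloc.append(mListCode)
--     for mIndexKey in range(len(mParamSchemasBlocs)) :
--         if mParamSchemasBlocs[mIndexKey][0][0:1] not in mListCodeBloc and mParamSchemasBlocs[mIndexKey][0][1:2] == "_" :
--            mListCodeBloc.append(mParamSchemasBlocs[mIndexKey][0][0:1]) #Ajouter sinon, doublons etc ....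
--            if 'd' in mParamListBlocs :
--               del mParamListBlocs['d']
--            mParamListBlocs[mParamSchemasBlocs[mIndexKey][0][0:1]] = "BLOC Non référencé (" + str(mParamSchemasBlocs[mIndexKey][0][0:1]).upper() + ")"
--            if 'd' not in mParamListBlocs : mParamListBlocs['d'] = 'Corbeille'
--     #mParamListBlocs = redresseBlocs(mParamListBlocs)
--     return mParamListBlocs
-- ===== SOURCE B (Python) =====
-- # Two-phase rewrite: first collect the unreferenced bloc codes (ordered, deduplicated
-- # via a seen-set seeded with the dict's keys), then apply them to the dict in one pass,
-- # ending with the 'd'/'Corbeille' entry.  Mutates mParamListBlocs in place, like the original.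
-- def returnDicBlocUniquementNonReference(mParamListBlocs, mParamSchemasBlocs):
--     seen = set(mParamListBlocs)
--     codes = []
--     for entry in mParamSchemasBlocs:
--         cle = entry[0]
--         code = cle[0:1]
--         if cle[1:2] == "_" and code not in seen:
--             seen.add(code)
--             codes.append(code)
--     if codes:
--         mParamListBlocs.pop('d', None)
--         for code in codes:
--             mParamListBlocs[code] = "BLOC Non référencé (" + code.upper() + ")"
--         mParamListBlocs['d'] = 'Corbeille'
--     return mParamListBlocs
-- ===== Notes on version B (the rewrite author's own statement) =====
-- stated objective: faster
-- what changed: Two-phase decomposition: one scan collects the ordered deduplicated unreferenced bloc codes against a seen-set seeded with the dict keys, then a single apply phase pops 'd', appends one labelled entry per code and ends with 'd'='Corbeille', instead of A's per-entry 'not in' scan of a growing key list and delete-'d'/insert/re-add-'d' dance inside the loop.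
-- intended difference: On inputs whose dict lacks key 'd' while some schema entry starts with 'd_', A's accepted code 'd' collides with its Corbeille bookkeeping (A ends with 'd'='BLOC Non référencé (D)' and no Corbeille, or silently deletes the just-added 'd' bloc when a later code follows), whereas B keeps every bloc entry and always ends the update with 'd'='Corbeille', which is the intended reserved-key behaviour. — e.g. on returnDicBlocUniquementNonReference([], [["d_x"]]): A returns [("d", "BLOC Non référencé (D)")], B returns [("d", "Corbeille")]
import Mathlib
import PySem

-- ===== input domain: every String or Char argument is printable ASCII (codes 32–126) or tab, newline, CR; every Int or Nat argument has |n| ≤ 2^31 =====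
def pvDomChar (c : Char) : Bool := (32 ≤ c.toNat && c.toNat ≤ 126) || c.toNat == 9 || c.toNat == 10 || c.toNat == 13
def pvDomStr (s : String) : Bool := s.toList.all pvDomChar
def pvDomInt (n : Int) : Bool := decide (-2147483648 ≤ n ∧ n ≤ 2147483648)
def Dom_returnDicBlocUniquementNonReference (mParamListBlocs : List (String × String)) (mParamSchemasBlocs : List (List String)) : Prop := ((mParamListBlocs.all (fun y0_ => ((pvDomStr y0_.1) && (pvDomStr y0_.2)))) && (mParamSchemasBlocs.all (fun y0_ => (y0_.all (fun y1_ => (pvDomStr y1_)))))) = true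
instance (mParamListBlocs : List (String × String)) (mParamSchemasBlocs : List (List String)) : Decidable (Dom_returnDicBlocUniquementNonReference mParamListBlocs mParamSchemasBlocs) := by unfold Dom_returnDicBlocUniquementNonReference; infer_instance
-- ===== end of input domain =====

-- B = two-phase rewrite (collect codes via a seen-set, then apply them once, Corbeille last); objective: faster (set membership replaces A's scan of a growing key list).
-- Both programs mutate the dict argument in Python; the equivalence proved here is about the return value.

-- ===== PORT A =====
-- one step of A's loop body; state = (the dict, mListCodeBloc)
def pvAStep (st : PySem.Dict String String × List String) (e : List String) :
    PySem.Dict String String × List String :=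
  let s := e.headD ""    -- mParamSchemasBlocs[mIndexKey][0]; the IndexError on [] is excluded by Pre_
  let c := PySem.Str.slice s (some 0) (some 1)
  if c ∉ st.2 ∧ PySem.Str.slice s (some 1) (some 2) = "_" then
    let codes := st.2 ++ [c]
    let d1 := if st.1.contains "d" then st.1.erase "d" else st.1
    let d2 := d1.insert c ("BLOC Non référencé (" ++ PySem.Str.upper c ++ ")")
    let d3 := if d2.contains "d" = false then d2.insert "d" "Corbeille" else d2
    (d3, codes)
  else st

def returnDicBlocUniquementNonReference (mParamListBlocs : List (String × String)) (mParamSchemasBlocs : List (List String)) : List (String × String) :=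
  let d0 : PySem.Dict String String := PySem.Dict.mk mParamListBlocs
  let mListCodeBloc := d0.keys          -- the first loop appends every key of the dict
  ((mParamSchemasBlocs.foldl pvAStep (d0, mListCodeBloc)).1).items

-- ===== PORT B =====
def pvLabel (c : String) : String := "BLOC Non référencé (" ++ PySem.Str.upper c ++ ")"

-- phase 1: one scan collecting the ordered deduplicated codes; state = (seen, codes)
def pvBScanStep (st : PySem.Set String × List String) (e : List String) :
    PySem.Set String × List String :=
  let cle := e.headD ""    -- entry[0]; the IndexError on [] is excluded by Pre_
  let code := PySem.Str.slice cle (some 0) (some 1)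
  if PySem.Str.slice cle (some 1) (some 2) = "_" ∧ ¬ (st.1.contains code = true) then
    (st.1.add code, st.2 ++ [code])
  else st

def returnDicBlocUniquementNonReference_alt (mParamListBlocs : List (String × String)) (mParamSchemasBlocs : List (List String)) : List (String × String) :=
  let d0 : PySem.Dict String String := PySem.Dict.mk mParamListBlocs
  let codes := (mParamSchemasBlocs.foldl pvBScanStep (PySem.Set.ofList d0.keys, [])).2
  if codes ≠ [] then
    -- phase 2: pop 'd', append one labelled entry per code, end with Corbeille
    let d1 := d0.erase "d"
    let d2 := codes.foldl (fun d c => d.insert c (pvLabel c)) d1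
    (d2.insert "d" "Corbeille").items
  else
    mParamListBlocs

-- ===== PRECONDITION & SPEC =====
-- Pre_ excludes exactly the inputs on which Python A raises: an empty inner list makes
-- mParamSchemasBlocs[mIndexKey][0] an IndexError (B raises there too).
def Pre_returnDicBlocUniquementNonReference (mParamListBlocs : List (String × String)) (mParamSchemasBlocs : List (List String)) : Prop :=
  ∀ e ∈ mParamSchemasBlocs, e ≠ []
instance (mParamListBlocs : List (String × String)) (mParamSchemasBlocs : List (List String)) : Decidable (Pre_returnDicBlocUniquementNonReference mParamListBlocs mParamSchemasBlocs) := by unfold Pre_returnDicBlocUniquementNonReference; infer_instance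

def pvWitness_returnDicBlocUniquementNonReference : (List (String × String)) × List (List String) :=
  ([("a", "Bloc A"), ("d", "Corbeille")], [["b_x"], ["a_y"], ["b_z"]])

-- On inputs whose dict lacks key 'd' while some schema entry starts with "d_", A's accepted code 'd'
-- collides with its Corbeille bookkeeping (A ends with 'd' = "BLOC Non référencé (D)" and no Corbeille,
-- or silently deletes the just-added 'd' bloc when a later code follows), whereas B keeps every bloc
-- entry and always ends the update with 'd' = "Corbeille", the intended reserved-key behaviour.
-- does this schema entry name an unreferenced bloc with code 'd' (key "d_...")?
def pvIsDBloc (s : String) : Bool :=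
  match s.toList with
  | 'd' :: '_' :: _ => true
  | _ => false

def D_returnDicBlocUniquementNonReference (mParamListBlocs : List (String × String)) (mParamSchemasBlocs : List (List String)) : Prop :=
  mParamListBlocs.all (fun p => !(p.1 == "d")) = true ∧
  mParamSchemasBlocs.any (fun e => pvIsDBloc (e.headD "")) = true
instance (mParamListBlocs : List (String × String)) (mParamSchemasBlocs : List (List String)) : Decidable (D_returnDicBlocUniquementNonReference mParamListBlocs mParamSchemasBlocs) := by unfold D_returnDicBlocUniquementNonReference; infer_instance

def Spec_returnDicBlocUniquementNonReference (mParamListBlocs : List (String × String)) (mParamSchemasBlocs : List (List String)) (out : List (String × String)) : Prop := ¬ D_returnDicBlocUniquementNonReference mParamListBlocs mParamSchemasBlocs → out = returnDicBlocUniquementNonReference_alt mParamListBlocs mParamSchemasBlocs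
instance (mParamListBlocs : List (String × String)) (mParamSchemasBlocs : List (List String)) (out : List (String × String)) : Decidable (Spec_returnDicBlocUniquementNonReference mParamListBlocs mParamSchemasBlocs out) := by unfold Spec_returnDicBlocUniquementNonReference; infer_instance

def pvDiffWitness_returnDicBlocUniquementNonReference : (List (String × String)) × List (List String) :=
  ([], [["d_x"]])
def pvDiffWitnessOut_returnDicBlocUniquementNonReference : (List (String × String)) × (List (String × String)) :=
  ([("d", "BLOC Non référencé (D)")], [("d", "Corbeille")])

-- ===== CLAIM (what is proved, stated in full; the proofs are below) =====
def Claim_unchanged_returnDicBlocUniquementNonReference : Prop := ∀ (mParamListBlocs : List (String × String)) (mParamSchemasBlocs : List (List String)), Dom_returnDicBlocUniquementNonReference mParamListBlocs mParamSchemasBlocs → Pre_returnDicBlocUniquementNonReference mParamListBlocs mParamSchemasBlocs → Spec_returnDicBlocUniquementNonReference mParamListBlocs mParamSchemasBlocs (returnDicBlocUniquementNonReference mParamListBlocs mParamSchemasBlocs)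
def Claim_changed_returnDicBlocUniquementNonReference : Prop := Dom_returnDicBlocUniquementNonReference (pvDiffWitness_returnDicBlocUniquementNonReference.1) (pvDiffWitness_returnDicBlocUniquementNonReference.2) ∧ Pre_returnDicBlocUniquementNonReference (pvDiffWitness_returnDicBlocUniquementNonReference.1) (pvDiffWitness_returnDicBlocUniquementNonReference.2) ∧ D_returnDicBlocUniquementNonReference (pvDiffWitness_returnDicBlocUniquementNonReference.1) (pvDiffWitness_returnDicBlocUniquementNonReference.2) ∧ returnDicBlocUniquementNonReference (pvDiffWitness_returnDicBlocUniquementNonReference.1) (pvDiffWitness_returnDicBlocUniquementNonReference.2) = pvDiffWitnessOut_returnDicBlocUniquementNonReference.1 ∧ returnDicBlocUniquementNonReference_alt (pvDiffWitness_returnDicBlocUniquementNonReference.1) (pvDiffWitness_returnDicBlocUniquementNonReference.2) = pvDiffWitnessOut_returnDicBlocUniquementNonReference.2 ∧ pvDiffWitnessOut_returnDicBlocUniquementNonReference.1 ≠ pvDiffWitnessOut_returnDicBlocUniquementNonReference.2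
def Claim_exact_returnDicBlocUniquementNonReference : Prop := ∀ (mParamListBlocs : List (String × String)) (mParamSchemasBlocs : List (List String)), Dom_returnDicBlocUniquementNonReference mParamListBlocs mParamSchemasBlocs → Pre_returnDicBlocUniquementNonReference mParamListBlocs mParamSchemasBlocs → D_returnDicBlocUniquementNonReference mParamListBlocs mParamSchemasBlocs → returnDicBlocUniquementNonReference mParamListBlocs mParamSchemasBlocs ≠ returnDicBlocUniquementNonReference_alt mParamListBlocs mParamSchemasBlocs

-- ===== LEMMAS AND PROOFS =====

-- the accepted codes, in order, starting from an already-seen list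
def pvNewCodes (codes : List String) : List (List String) → List String
  | [] => []
  | e :: r =>
    let s := e.headD ""
    let c := PySem.Str.slice s (some 0) (some 1)
    if c ∉ codes ∧ PySem.Str.slice s (some 1) (some 2) = "_"
    then c :: pvNewCodes (codes ++ [c]) r
    else pvNewCodes codes r

-- value sitting under key "d" at the end of A's loop, given the value v it had
-- when the loop state last had shape base ++ [("d", v)]
def pvDVal (v : String) (cs : List String) : String :=
  match cs.getLast? with
  | none => v
  | some c => if c = "d" then pvLabel "d" else "Corbeille"

theorem pvDVal_cons (v : String) (c : String) (cs : List String) :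
    pvDVal v (c :: cs) = pvDVal (if c = "d" then pvLabel "d" else "Corbeille") cs := by
  cases cs with
  | nil => simp [pvDVal]
  | cons b t =>
    cases h : (b :: t).getLast? with
    | none => simp at h
    | some x => simp [pvDVal, List.getLast?_cons_cons, h]

theorem pvNewCodes_not_mem {c : String} {codes : List String} {l : List (List String)}
    (h : c ∈ pvNewCodes codes l) : c ∉ codes := by
  induction l generalizing codes with
  | nil => simp [pvNewCodes] at h
  | cons e r ih =>
    simp only [pvNewCodes] at h
    split at h
    · rename_i hc
      rcases List.mem_cons.mp h with rfl | h'
      · exact hc.1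
      · intro hmem; exact (ih h') (by simp [hmem])
    · exact ih h

theorem pvNewCodes_nodup (codes : List String) (l : List (List String)) :
    (pvNewCodes codes l).Nodup := by
  induction l generalizing codes with
  | nil => simp [pvNewCodes]
  | cons e r ih =>
    simp only [pvNewCodes]
    split
    · exact List.nodup_cons.mpr ⟨fun h => (pvNewCodes_not_mem h) (by simp), ih _⟩
    · exact ih _

-- the acceptance test on a schema entry, in terms of the raw string
theorem pvSlicePrefix (s : String) (h1 : PySem.Str.slice s (some 0) (some 1) = "d")
    (h2 : PySem.Str.slice s (some 1) (some 2) = "_") : ['d', '_'] <+: s.toList := by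
  have h1' : (PySem.Str.slice s (some 0) (some 1)).toList = ['d'] := by rw [h1]; rfl
  have h2' : (PySem.Str.slice s (some 1) (some 2)).toList = ['_'] := by rw [h2]; rfl
  simp [pysem] at h1' h2'
  rcases hl : s.toList with _ | ⟨a, l⟩
  · rw [hl] at h1'; simp at h1'
  · rcases l with _ | ⟨b, l'⟩
    · rw [hl] at h2'; simp at h2'
    · rw [hl] at h1' h2'; simp at h1' h2'
      simp [h1', h2', List.cons_prefix_cons]

theorem pvPrefixSlice (s : String) (h : ['d', '_'] <+: s.toList) :
    PySem.Str.slice s (some 0) (some 1) = "d" ∧ PySem.Str.slice s (some 1) (some 2) = "_" := by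
  obtain ⟨t, ht⟩ := h
  constructor
  · apply String.toList_inj.mp
    have : (PySem.Str.slice s (some 0) (some 1)).toList = s.toList.take 1 := by simp [pysem]
    rw [this, ← ht]; rfl
  · apply String.toList_inj.mp
    have : (PySem.Str.slice s (some 1) (some 2)).toList = (s.toList.drop 1).take 1 := by
      simp [pysem]
    rw [this, ← ht]; rfl

theorem pvIsDBloc_iff (s : String) : pvIsDBloc s = true ↔ ['d', '_'] <+: s.toList := by
  unfold pvIsDBloc
  rcases h : s.toList with _ | ⟨a, l⟩
  · simp
  · rcases l with _ | ⟨b, l'⟩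
    · simp
    · constructor
      · intro ht
        by_cases ha : a = 'd'
        · by_cases hb : b = '_'
          · simp [ha, hb, List.cons_prefix_cons]
          · subst ha; simp [hb] at ht
        · simp [ha] at ht
      · intro hp
        rw [List.cons_prefix_cons] at hp
        obtain ⟨ha, hp⟩ := hp
        rw [List.cons_prefix_cons] at hp
        obtain ⟨hb, -⟩ := hp
        simp [← ha, ← hb]

theorem pvAllNoD_iff (l : List (String × String)) :
    l.all (fun p => !(p.1 == "d")) = true ↔ "d" ∉ l.map Prod.fst := by
  rw [List.all_eq_true]
  constructor
  · intro h hm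
    obtain ⟨p, hp, hpe⟩ := List.mem_map.mp hm
    have := h p hp
    simp [hpe] at this
  · intro h p hp
    simp only [Bool.not_eq_eq_eq_not, Bool.not_true, beq_eq_false_iff_ne]
    exact fun hd => h (by simpa [hd] using List.mem_map_of_mem (f := Prod.fst) hp)

theorem pvNewCodes_d_mem {codes : List String} {l : List (List String)}
    (h : "d" ∈ pvNewCodes codes l) :
    ∃ e ∈ l, ['d', '_'] <+: (e.headD "").toList := by
  induction l generalizing codes with
  | nil => simp [pvNewCodes] at h
  | cons e r ih =>
    simp only [pvNewCodes] at h
    split at h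
    · rename_i hc
      rcases List.mem_cons.mp h with heq | h'
      · exact ⟨e, by simp, pvSlicePrefix _ heq.symm hc.2⟩
      · obtain ⟨e', he', hs⟩ := ih h'; exact ⟨e', by simp [he'], hs⟩
    · obtain ⟨e', he', hs⟩ := ih h; exact ⟨e', by simp [he'], hs⟩

theorem pvNewCodes_d_mem' {codes : List String} {l : List (List String)}
    (hnd : "d" ∉ codes) (h : ∃ e ∈ l, ['d', '_'] <+: (e.headD "").toList) :
    "d" ∈ pvNewCodes codes l := by
  induction l generalizing codes with
  | nil => simp at h
  | cons e r ih =>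
    simp only [pvNewCodes]
    by_cases hcond : (PySem.Str.slice (e.headD "") (some 0) (some 1)) ∉ codes ∧
        PySem.Str.slice (e.headD "") (some 1) (some 2) = "_"
    · rw [if_pos hcond]
      by_cases hcd : PySem.Str.slice (e.headD "") (some 0) (some 1) = "d"
      · rw [hcd]; simp
      · refine List.mem_cons_of_mem _ (ih (fun hm => by
          rcases List.mem_append.mp hm with hm' | hm'
          · exact hnd hm'
          · simp only [List.mem_singleton] at hm'; exact hcd hm'.symm) ?_)
        obtain ⟨e', he', hs⟩ := h
        rcases List.mem_cons.mp he' with rfl | he'r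
        · exact absurd (pvPrefixSlice _ hs).1 hcd
        · exact ⟨e', he'r, hs⟩
    · rw [if_neg hcond]
      refine ih hnd ?_
      obtain ⟨e', he', hs⟩ := h
      rcases List.mem_cons.mp he' with rfl | he'r
      · obtain ⟨h1, h2⟩ := pvPrefixSlice _ hs
        exact absurd ⟨by rw [h1]; exact hnd, h2⟩ hcond
      · exact ⟨e', he'r, hs⟩

-- filtering out key "d" is the identity when "d" is not a key
theorem pvFilter_d_id {xs : List (String × String)} (h : "d" ∉ xs.map Prod.fst) :
    xs.filter (fun p => !(p.1 == "d")) = xs := by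
  apply List.filter_eq_self.mpr
  intro p hp
  simp only [Bool.not_eq_eq_eq_not, Bool.not_true, beq_eq_false_iff_ne]
  intro hd; exact h (by simpa [hd] using List.mem_map_of_mem (f := Prod.fst) hp)

theorem pvEraseD (xs : List (String × String)) :
    (PySem.Dict.mk xs).erase "d" = PySem.Dict.mk (xs.filter (fun p => !(p.1 == "d"))) := rfl

theorem pvContainsT (d : PySem.Dict String String) (k : String)
    (h : k ∈ d.items.map Prod.fst) : d.contains k = true := by
  rw [PySem.Dict.contains_eq_decide_mem_keys]
  simpa [PySem.Dict.keys] using h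

theorem pvContainsF (d : PySem.Dict String String) (k : String)
    (h : k ∉ d.items.map Prod.fst) : d.contains k = false := by
  rw [PySem.Dict.contains_eq_decide_mem_keys]
  simpa [PySem.Dict.keys] using h

theorem pvInsert_fresh (d : PySem.Dict String String) (k v : String)
    (h : k ∉ d.items.map Prod.fst) :
    d.insert k v = PySem.Dict.mk (d.items ++ [(k, v)]) := by
  unfold PySem.Dict.insert
  rw [pvContainsF d k h]
  simp

theorem pvNotMemFilter (xs : List (String × String)) (k : String) (h : k ∉ xs.map Prod.fst) :
    k ∉ (xs.filter (fun p => !(p.1 == "d"))).map Prod.fst := by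
  intro hm
  obtain ⟨p, hp, hpe⟩ := List.mem_map.mp hm
  exact h (by simpa [hpe] using List.mem_map_of_mem (f := Prod.fst) (List.mem_of_mem_filter hp))

theorem pvDNotMemFilter (xs : List (String × String)) :
    "d" ∉ (xs.filter (fun p => !(p.1 == "d"))).map Prod.fst := by
  intro h
  obtain ⟨p, hp, hpe⟩ := List.mem_map.mp h
  have := List.of_mem_filter hp
  simp [hpe] at this

theorem pvDNotMemApp (base : List (String × String)) (c lab : String)
    (hd : "d" ∉ base.map Prod.fst) (hcd : c ≠ "d") :
    "d" ∉ (base ++ [(c, lab)]).map Prod.fst := by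
  simp only [List.map_append, List.mem_append]
  rintro (h | h)
  · exact hd h
  · simp at h; exact hcd h.symm

theorem pvSetContains (s : PySem.Set String) (x : String) :
    s.contains x = true ↔ x ∈ (s : List String) := by
  simp [PySem.Set.contains]

-- A's loop after the first accepted code: the dict has shape base ++ [("d", v)]
theorem pvA_post (l : List (List String)) (codes : List String)
    (base : List (String × String)) (v : String)
    (hsub : ∀ k ∈ base.map Prod.fst, k ∈ codes)
    (hd : "d" ∉ base.map Prod.fst) :
    l.foldl pvAStep (PySem.Dict.mk (base ++ [("d", v)]), codes) =
      (PySem.Dict.mk (base ++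
        ((pvNewCodes codes l).filter (fun c => !(c == "d"))).map (fun c => (c, pvLabel c)) ++
        [("d", pvDVal v (pvNewCodes codes l))]), codes ++ pvNewCodes codes l) := by
  induction l generalizing codes base v with
  | nil => simp [pvNewCodes, pvDVal]
  | cons e r ih =>
    rw [List.foldl_cons]
    simp only [pvNewCodes]
    by_cases hcond : (PySem.Str.slice (e.headD "") (some 0) (some 1)) ∉ codes ∧
        PySem.Str.slice (e.headD "") (some 1) (some 2) = "_"
    · set c := PySem.Str.slice (e.headD "") (some 0) (some 1) with hc
      rw [if_pos hcond]
      have hcb : c ∉ base.map Prod.fst := fun h => hcond.1 (hsub c h)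
      by_cases hcd : c = "d"
      · -- the accepted code is "d": it replaces the trailing Corbeille entry
        have hstep : pvAStep (PySem.Dict.mk (base ++ [("d", v)]), codes) e =
            (PySem.Dict.mk (base ++ [("d", pvLabel "d")]), codes ++ [c]) := by
          simp only [pvAStep, ← hc, show ∀ s : String,
            "BLOC Non référencé (" ++ PySem.Str.upper s ++ ")" = pvLabel s from fun _ => rfl]
          rw [if_pos hcond]
          rw [if_pos (pvContainsT _ "d" (by simp)), pvEraseD]
          rw [show (base ++ [("d", v)]).filter (fun p => !(p.1 == "d")) = base by
            rw [List.filter_append, pvFilter_d_id hd]; simp]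
          rw [pvInsert_fresh _ _ _ hcb, hcd]
          rw [if_neg (by rw [pvContainsT _ "d" (by simp)]; simp)]
        rw [hstep, ih (codes ++ [c]) base (pvLabel "d") (fun k hk => by simp [hsub k hk]) hd]
        rw [pvDVal_cons, if_pos hcd]
        simp [hcd]
      · -- the accepted code is some other key: append it, Corbeille moves to the end
        have hstep : pvAStep (PySem.Dict.mk (base ++ [("d", v)]), codes) e =
            (PySem.Dict.mk ((base ++ [(c, pvLabel c)]) ++ [("d", "Corbeille")]),
              codes ++ [c]) := by
          simp only [pvAStep, ← hc, show ∀ s : String,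
            "BLOC Non référencé (" ++ PySem.Str.upper s ++ ")" = pvLabel s from fun _ => rfl]
          rw [if_pos hcond]
          rw [if_pos (pvContainsT _ "d" (by simp)), pvEraseD]
          rw [show (base ++ [("d", v)]).filter (fun p => !(p.1 == "d")) = base by
            rw [List.filter_append, pvFilter_d_id hd]; simp]
          rw [pvInsert_fresh _ _ _ hcb]
          rw [if_pos (by rw [pvContainsF _ "d" (pvDNotMemApp base c _ hd hcd)])]
          rw [pvInsert_fresh _ _ _ (pvDNotMemApp base c _ hd hcd)]
        rw [hstep, ih (codes ++ [c]) (base ++ [(c, pvLabel c)]) "Corbeille"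
          (by intro k hk; simp only [List.map_append] at hk
              rcases List.mem_append.mp hk with h | h
              · exact List.mem_append.mpr (Or.inl (hsub k h))
              · simp at h; simp [h])
          (pvDNotMemApp base c _ hd hcd)]
        rw [pvDVal_cons, if_neg hcd]
        simp [hcd]
    · rw [if_neg hcond]
      have hstep : pvAStep (PySem.Dict.mk (base ++ [("d", v)]), codes) e =
          (PySem.Dict.mk (base ++ [("d", v)]), codes) := by
        simp only [pvAStep]; rw [if_neg hcond]
      rw [hstep, ih codes base v hsub hd]

-- A's loop from the initial state
theorem pvA_main (l : List (List String)) (codes : List String)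
    (xs : List (String × String))
    (hsub : ∀ k ∈ xs.map Prod.fst, k ∈ codes) :
    l.foldl pvAStep (PySem.Dict.mk xs, codes) =
      if pvNewCodes codes l = [] then (PySem.Dict.mk xs, codes)
      else (PySem.Dict.mk ((xs.filter (fun p => !(p.1 == "d"))) ++
        ((pvNewCodes codes l).filter (fun c => !(c == "d"))).map (fun c => (c, pvLabel c)) ++
        [("d", pvDVal "Corbeille" (pvNewCodes codes l))]),
        codes ++ pvNewCodes codes l) := by
  induction l generalizing codes with
  | nil => simp [pvNewCodes]
  | cons e r ih =>
    rw [List.foldl_cons]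
    simp only [pvNewCodes]
    by_cases hcond : (PySem.Str.slice (e.headD "") (some 0) (some 1)) ∉ codes ∧
        PySem.Str.slice (e.headD "") (some 1) (some 2) = "_"
    · set c := PySem.Str.slice (e.headD "") (some 0) (some 1) with hc
      rw [if_pos hcond]
      have hcx : c ∉ xs.map Prod.fst := fun h => hcond.1 (hsub c h)
      have herase : (if (PySem.Dict.mk xs).contains "d" then (PySem.Dict.mk xs).erase "d"
          else PySem.Dict.mk xs) = PySem.Dict.mk (xs.filter (fun p => !(p.1 == "d"))) := by
        by_cases hin : "d" ∈ xs.map Prod.fst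
        · rw [if_pos (pvContainsT _ "d" hin), pvEraseD]
        · rw [if_neg (by rw [pvContainsF _ "d" hin]; simp), pvFilter_d_id hin]
      by_cases hcd : c = "d"
      · have hstep : pvAStep (PySem.Dict.mk xs, codes) e =
            (PySem.Dict.mk ((xs.filter (fun p => !(p.1 == "d"))) ++ [("d", pvLabel "d")]),
              codes ++ [c]) := by
          simp only [pvAStep, ← hc, show ∀ s : String,
            "BLOC Non référencé (" ++ PySem.Str.upper s ++ ")" = pvLabel s from fun _ => rfl]
          rw [if_pos hcond, herase]
          rw [pvInsert_fresh _ _ _ (pvNotMemFilter xs c hcx), hcd]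
          rw [if_neg (by rw [pvContainsT _ "d" (by simp)]; simp)]
        rw [hstep, pvA_post r (codes ++ [c]) _ (pvLabel "d")
          (by intro k hk
              obtain ⟨p, hp, hpe⟩ := List.mem_map.mp hk
              simp [hsub k (by
                simpa [hpe] using List.mem_map_of_mem (f := Prod.fst) (List.mem_of_mem_filter hp))])
          (pvDNotMemFilter xs)]
        rw [if_neg (by simp)]
        rw [pvDVal_cons, if_pos hcd]
        simp [hcd]
      · have hstep : pvAStep (PySem.Dict.mk xs, codes) e =
            (PySem.Dict.mk (((xs.filter (fun p => !(p.1 == "d"))) ++ [(c, pvLabel c)]) ++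
              [("d", "Corbeille")]), codes ++ [c]) := by
          simp only [pvAStep, ← hc, show ∀ s : String,
            "BLOC Non référencé (" ++ PySem.Str.upper s ++ ")" = pvLabel s from fun _ => rfl]
          rw [if_pos hcond, herase]
          rw [pvInsert_fresh _ _ _ (pvNotMemFilter xs c hcx)]
          rw [if_pos (by
            rw [pvContainsF _ "d" (pvDNotMemApp _ c _ (pvDNotMemFilter xs) hcd)])]
          rw [pvInsert_fresh _ _ _ (pvDNotMemApp _ c _ (pvDNotMemFilter xs) hcd)]
        rw [hstep, pvA_post r (codes ++ [c]) _ "Corbeille"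
          (by intro k hk
              simp only [List.map_append] at hk
              rcases List.mem_append.mp hk with h | h
              · exact List.mem_append.mpr (Or.inl (hsub k (by
                  obtain ⟨p, hp, hpe⟩ := List.mem_map.mp h
                  simpa [hpe] using List.mem_map_of_mem (f := Prod.fst) (List.mem_of_mem_filter hp))))
              · simp at h; simp [h])
          (pvDNotMemApp _ c _ (pvDNotMemFilter xs) hcd)]
        rw [if_neg (by simp)]
        rw [pvDVal_cons, if_neg hcd]
        simp [hcd]
    · rw [if_neg hcond]
      have hstep : pvAStep (PySem.Dict.mk xs, codes) e = (PySem.Dict.mk xs, codes) := by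
        simp only [pvAStep]; rw [if_neg hcond]
      rw [hstep, ih codes hsub]

-- B's scan computes pvNewCodes
theorem pvB_scan (l : List (List String)) (seen : PySem.Set String)
    (codes acc : List String)
    (hs : ∀ x : String, x ∈ (seen : List String) ↔ x ∈ codes) :
    (l.foldl pvBScanStep (seen, acc)).2 = acc ++ pvNewCodes codes l := by
  induction l generalizing seen codes acc with
  | nil => simp [pvNewCodes]
  | cons e r ih =>
    rw [List.foldl_cons]
    simp only [pvBScanStep, pvNewCodes]
    by_cases hcond : (PySem.Str.slice (e.headD "") (some 0) (some 1)) ∉ codes ∧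
        PySem.Str.slice (e.headD "") (some 1) (some 2) = "_"
    · set c := PySem.Str.slice (e.headD "") (some 0) (some 1) with hc
      rw [if_pos ⟨hcond.2, fun h => hcond.1 ((hs c).mp ((pvSetContains seen c).mp h))⟩,
        if_pos hcond]
      rw [ih (seen.add c) (codes ++ [c]) (acc ++ [c]) (by
        intro x
        rw [PySem.Set.mem_add]
        constructor
        · rintro (h | rfl)
          · exact List.mem_append.mpr (Or.inl ((hs x).mp h))
          · simp
        · intro h
          rcases List.mem_append.mp h with h' | h'
          · exact Or.inl ((hs x).mpr h')
          · simp at h'; exact Or.inr h')]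
      simp
    · rw [if_neg (by
        rintro ⟨h1, h2⟩
        exact hcond ⟨fun hm => h2 ((pvSetContains seen _).mpr ((hs _).mpr hm)), h1⟩),
        if_neg hcond]
      exact ih seen codes acc hs

-- B's apply phase, as one list expression (also when "d" is itself one of the codes)
theorem pvB_apply (xs : List (String × String)) (codes : List String)
    (hnodup : codes.Nodup)
    (hfresh : ∀ c ∈ codes, c ∉ xs.map Prod.fst) :
    ((codes.foldl (fun d c => d.insert c (pvLabel c)) ((PySem.Dict.mk xs).erase "d")).insert
      "d" "Corbeille").items =
      (xs.filter (fun p => !(p.1 == "d"))) ++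
        codes.map (fun c => if c = "d" then ("d", "Corbeille") else (c, pvLabel c)) ++
        (if "d" ∈ codes then [] else [("d", "Corbeille")]) := by
  rw [pvEraseD]
  have hfold := PySem.Dict.items_foldl_insert_fresh
    (l := codes) (k := fun c => c) (v := fun c => pvLabel c)
    (d := PySem.Dict.mk (xs.filter (fun p => !(p.1 == "d"))))
    (fun c hc => pvContainsF _ c (pvNotMemFilter xs c (hfresh c hc))) (by simpa)
  by_cases hdc : "d" ∈ codes
  · -- the final insert overwrites the "d" entry in place
    have hcont : ((codes.foldl (fun d c => d.insert c (pvLabel c))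
        (PySem.Dict.mk (xs.filter (fun p => !(p.1 == "d"))))).contains "d") = true := by
      apply pvContainsT
      rw [hfold]
      simp only [List.map_append, List.mem_append]
      exact Or.inr (by simpa using List.mem_map_of_mem (f := fun c => (c, pvLabel c)) hdc)
    rw [if_pos hdc]
    rw [PySem.Dict.items_insert_of_contains _ _ hcont, hfold]
    simp only [List.map_append, List.append_nil]
    congr 1
    · rw [List.map_congr_left (g := id) (fun p hp => by
        have hne := List.of_mem_filter hp
        simp only [Bool.not_eq_eq_eq_not, Bool.not_true, beq_eq_false_iff_ne] at hne
        simp [hne]), List.map_id]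
    · rw [List.map_map]
      apply List.map_congr_left
      intro c hc
      by_cases h : c = "d" <;> simp [h]
  · have hcont : ((codes.foldl (fun d c => d.insert c (pvLabel c))
        (PySem.Dict.mk (xs.filter (fun p => !(p.1 == "d"))))).contains "d") = false := by
      apply pvContainsF
      rw [hfold]
      simp only [List.map_append, List.mem_append]
      rintro (h | h)
      · exact pvDNotMemFilter xs h
      · obtain ⟨p, hp, hpe⟩ := List.mem_map.mp h
        obtain ⟨c, hc, rfl⟩ := List.mem_map.mp hp
        exact hdc (by simpa using hpe ▸ hc)
    rw [if_neg hdc]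
    rw [pvInsert_fresh _ _ _ (by
      intro h
      rw [hfold] at h
      simp only [List.map_append, List.mem_append] at h
      rcases h with h | h
      · exact pvDNotMemFilter xs h
      · obtain ⟨p, hp, hpe⟩ := List.mem_map.mp h
        obtain ⟨c, hc, rfl⟩ := List.mem_map.mp hp
        exact hdc (by simpa using hpe ▸ hc))]
    show (_ : List (String × String)) ++ _ = _
    rw [hfold]
    rw [show codes.map (fun c => if c = "d" then ("d", "Corbeille") else (c, pvLabel c)) =
      codes.map (fun c => (c, pvLabel c)) from
      List.map_congr_left (fun c hc => by
        rw [if_neg (fun h : c = "d" => hdc (by rw [← h]; exact hc))])]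

-- ===== VERDICT (by name: the statement is the Claim_ definition above) =====
theorem returnDicBlocUniquementNonReference_spec : Claim_unchanged_returnDicBlocUniquementNonReference := by
  intro l schemas _hdom _hpre hnD
  unfold returnDicBlocUniquementNonReference returnDicBlocUniquementNonReference_alt
  simp only []
  set keys0 := (PySem.Dict.mk l).keys with hk0
  have hkeq : keys0 = l.map Prod.fst := rfl
  -- "d" never becomes an accepted code outside D_
  have hnd : "d" ∉ pvNewCodes keys0 schemas := by
    intro h
    obtain ⟨e, he, hs⟩ := pvNewCodes_d_mem h
    have hdk : "d" ∉ l.map Prod.fst := by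
      have := pvNewCodes_not_mem h
      rwa [hkeq] at this
    exact hnD ⟨(pvAllNoD_iff l).mpr hdk,
      List.any_eq_true.mpr ⟨e, he, (pvIsDBloc_iff _).mpr hs⟩⟩
  have hsub : ∀ k ∈ l.map Prod.fst, k ∈ keys0 := by rw [hkeq]; exact fun k h => h
  have hscan : (schemas.foldl pvBScanStep (PySem.Set.ofList keys0, [])).2 =
      pvNewCodes keys0 schemas := by
    simpa using pvB_scan schemas (PySem.Set.ofList keys0) keys0 []
      (fun x => PySem.Set.mem_ofList keys0 x)
  rw [pvA_main schemas keys0 l hsub, hscan]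
  by_cases hempty : pvNewCodes keys0 schemas = []
  · rw [if_pos hempty]
    rw [if_neg (by simp [hempty])]
  · rw [if_neg hempty, if_pos hempty]
    rw [pvB_apply l (pvNewCodes keys0 schemas) (pvNewCodes_nodup _ _)
      (fun c hc => fun hm => (pvNewCodes_not_mem hc) (hsub c hm))]
    rw [if_neg hnd]
    rw [show (pvNewCodes keys0 schemas).filter (fun c => !(c == "d")) =
        pvNewCodes keys0 schemas from List.filter_eq_self.mpr (fun c hc => by
      simp only [Bool.not_eq_eq_eq_not, Bool.not_true, beq_eq_false_iff_ne]
      exact fun h : c = "d" => hnd (by rw [← h]; exact hc))]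
    rw [show (pvNewCodes keys0 schemas).map
        (fun c => if c = "d" then ("d", "Corbeille") else (c, pvLabel c)) =
        (pvNewCodes keys0 schemas).map (fun c => (c, pvLabel c)) from
      List.map_congr_left (fun c hc => by
        rw [if_neg (fun h : c = "d" => hnd (by rw [← h]; exact hc))])]
    rw [show pvDVal "Corbeille" (pvNewCodes keys0 schemas) = "Corbeille" from by
      unfold pvDVal
      cases hgl : (pvNewCodes keys0 schemas).getLast? with
      | none => rfl
      | some c =>
        show (if c = "d" then pvLabel "d" else "Corbeille") = "Corbeille"
        rw [if_neg (fun h : c = "d" => hnd (by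
          rw [← h]; exact List.mem_of_getLast? hgl))]]

theorem returnDicBlocUniquementNonReference_changed : Claim_changed_returnDicBlocUniquementNonReference := by
  unfold Claim_changed_returnDicBlocUniquementNonReference; decide

theorem returnDicBlocUniquementNonReference_tight : Claim_exact_returnDicBlocUniquementNonReference := by
  intro l schemas _hdom _hpre hD heq
  obtain ⟨hdk', hany⟩ := hD
  have hdk : "d" ∉ l.map Prod.fst := (pvAllNoD_iff l).mp hdk'
  obtain ⟨e, he, hsb⟩ := List.any_eq_true.mp hany
  have hs : ['d', '_'] <+: (e.headD "").toList := (pvIsDBloc_iff _).mp hsb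
  set keys0 := (PySem.Dict.mk l).keys with hk0
  have hsub : ∀ k ∈ l.map Prod.fst, k ∈ keys0 := fun k h => h
  have hdnc : "d" ∈ pvNewCodes keys0 schemas :=
    pvNewCodes_d_mem' (show "d" ∉ l.map Prod.fst from hdk) ⟨e, he, hs⟩
  have hempty : pvNewCodes keys0 schemas ≠ [] := List.ne_nil_of_mem hdnc
  have hscan : (schemas.foldl pvBScanStep (PySem.Set.ofList keys0, [])).2 =
      pvNewCodes keys0 schemas := by
    simpa using pvB_scan schemas (PySem.Set.ofList keys0) keys0 []
      (fun x => PySem.Set.mem_ofList keys0 x)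
  unfold returnDicBlocUniquementNonReference returnDicBlocUniquementNonReference_alt at heq
  simp only [] at heq
  rw [pvA_main schemas keys0 l hsub, if_neg hempty, hscan, if_pos hempty,
    pvB_apply l (pvNewCodes keys0 schemas) (pvNewCodes_nodup _ _)
      (fun c hc => fun hm => (pvNewCodes_not_mem hc) (hsub c hm)),
    if_pos hdnc, List.append_nil] at heq
  -- compare the final entries of the two results
  have hlast := congrArg List.getLast? heq
  rw [List.getLast?_concat] at hlast
  obtain ⟨cl, hcl⟩ : ∃ cl, (pvNewCodes keys0 schemas).getLast? = some cl := by
    cases hgl : (pvNewCodes keys0 schemas).getLast? with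
    | none => exact absurd (List.getLast?_eq_none_iff.mp hgl) hempty
    | some c => exact ⟨c, rfl⟩
  have hmapne : (pvNewCodes keys0 schemas).map
      (fun c => if c = "d" then ("d", "Corbeille") else (c, pvLabel c)) ≠ [] := by
    simp [hempty]
  rw [List.getLast?_append_of_ne_nil _ hmapne, List.getLast?_map, hcl] at hlast
  unfold pvDVal at hlast
  rw [hcl] at hlast
  simp only [Option.map_some, Option.some_inj] at hlast
  by_cases hcd : cl = "d"
  · rw [if_pos hcd, if_pos hcd] at hlast
    exact absurd (congrArg Prod.snd hlast) (by decide)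
  · rw [if_neg hcd, if_neg hcd] at hlast
    exact hcd (congrArg Prod.fst hlast).symm
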